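-- pv_equiv track=rewrite | github.com/syakoo/competitive-programming | atcoder/jsc2021/e.py | make_perf_tree
-- ===== SOURCE A (Python) =====
-- def make_perf_tree(s):
--     sn = len(s)
--     if sn == 1:
--         return s
--
--     sp = ''
--     if not sn & 1:
--         sp = 'e'
--     return sp.join([make_perf_tree(s[:sn//2]), make_perf_tree(s[sn//2:])])
-- ===== SOURCE B (Python) =====
-- def make_perf_tree(s):
--     # Iterative version: an explicit stack of index ranges walked in-order,
--     # emitting single chars and 'e' markers into a list, joined once at the end.
--     out = []
--     stack = [(0, len(s))]
--     while stack:
--         item = stack.pop()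
--         if item is None:
--             out.append('e')
--             continue
--         i, j = item
--         if j - i == 1:
--             out.append(s[i])
--         else:
--             m = i + (j - i) // 2
--             stack.append((m, j))
--             if (j - i) % 2 == 0:
--                 stack.append(None)
--             stack.append((i, m))
--     return ''.join(out)
-- ===== Notes on version B (the rewrite author's own statement) =====
-- stated objective: alternative
-- what changed: Replaces the recursive split-and-join (a fresh joined string at every tree level) with an explicit stack of index ranges walked in-order, appending single characters and 'e' separators to a list joined once at the end; it trades recursion for an iterative loop of the same measured cost.
import Mathlib
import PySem

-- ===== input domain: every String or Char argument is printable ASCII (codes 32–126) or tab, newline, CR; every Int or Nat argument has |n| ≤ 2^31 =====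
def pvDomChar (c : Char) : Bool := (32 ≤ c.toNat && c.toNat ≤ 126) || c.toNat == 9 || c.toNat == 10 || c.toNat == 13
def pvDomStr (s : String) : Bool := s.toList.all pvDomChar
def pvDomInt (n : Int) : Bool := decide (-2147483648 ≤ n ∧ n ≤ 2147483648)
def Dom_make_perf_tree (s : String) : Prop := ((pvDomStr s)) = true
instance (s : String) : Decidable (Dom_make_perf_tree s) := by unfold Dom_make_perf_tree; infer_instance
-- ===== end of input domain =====

-- B replaces A's recursive split-and-join with an explicit stack of index ranges
-- walked in-order, appending chars and 'e' separators to a list joined once (alternative, same measured cost).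
-- ===== PORT A =====
-- A's recursion on the character list; string slicing s[:k] / s[k:] becomes take/drop.
-- The fuel argument and the `l.length = 0` branch only make the recursion total:
-- on the empty string Python recurses forever (excluded by Pre_), and fuel = initial
-- length is enough for every nonempty input, so neither guard is reached under Pre_.
def pvARec : Nat → List Char → List Char
  | 0, l => l
  | fuel + 1, l =>
    if l.length = 1 then l
    else if l.length = 0 then l
    else
      pvARec fuel (l.take (l.length / 2))
        ++ (if l.length % 2 = 0 then ['e'] else [])
        ++ pvARec fuel (l.drop (l.length / 2))

def make_perf_tree (s : String) : String :=
  String.ofList (pvARec s.toList.length s.toList)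

-- ===== PORT B =====
-- Stack items: `none` is the 'e' marker, `some (i, j)` the half-open range s[i:j].
-- The fuel argument and the `j ≤ i` branch only make the loop total: Python's loop
-- pops a zero-width range (and so runs forever) only for the empty string, which
-- Pre_ excludes, and 3·|s| units of fuel cover every step of the loop there.
def pvBLoop : Nat → List Char → List (Option (Nat × Nat)) → List Char → List Char
  | 0, _, _, out => out
  | fuel + 1, s, stack, out =>
    match stack with
    | [] => out
    | none :: rest => pvBLoop fuel s rest (out ++ ['e'])
    | some (i, j) :: rest =>
      if j - i = 1 then pvBLoop fuel s rest (out ++ (s.drop i).take 1)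
      else if j ≤ i then pvBLoop fuel s rest out
      else
        let m := i + (j - i) / 2
        pvBLoop fuel s
          (some (i, m) ::
            (if (j - i) % 2 = 0 then (none : Option (Nat × Nat)) :: some (m, j) :: rest
             else some (m, j) :: rest))
          out

def make_perf_tree_alt (s : String) : String :=
  String.ofList (pvBLoop (3 * s.toList.length) s.toList [some (0, s.toList.length)] [])

-- ===== PRECONDITION & SPEC =====
-- Pre_ excludes only the empty string, on which A raises RecursionError.
def Pre_make_perf_tree (s : String) : Prop := s ≠ ""
instance (s : String) : Decidable (Pre_make_perf_tree s) := by
  unfold Pre_make_perf_tree; infer_instance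
def pvWitness_make_perf_tree : String := "ab"
def Spec_make_perf_tree (s : String) (out : String) : Prop := out = make_perf_tree_alt s
instance (s : String) (out : String) : Decidable (Spec_make_perf_tree s out) := by
  unfold Spec_make_perf_tree; infer_instance

-- ===== CLAIM (what is proved, stated in full; the proofs are below) =====
def Claim_equal_make_perf_tree : Prop :=
  ∀ (s : String), Dom_make_perf_tree s → Pre_make_perf_tree s →
    Spec_make_perf_tree s (make_perf_tree s)

-- ===== LEMMAS AND PROOFS =====

-- A's fuel is irrelevant as long as it covers the list's length.
theorem pvARec_congr :
    ∀ n (l : List Char) (f f' : Nat), l.length = n → n ≤ f → n ≤ f' →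
      pvARec f l = pvARec f' l := by
  intro n
  induction n using Nat.strong_induction_on with
  | _ n ih =>
    intro l f f' hn hf hf'
    match f, f' with
    | 0, 0 => rfl
    | 0, g' + 1 =>
      have h0 : l.length = 0 := by omega
      rw [pvARec, pvARec, if_neg (by omega), if_pos h0]
    | g + 1, 0 =>
      have h0 : l.length = 0 := by omega
      rw [pvARec, pvARec, if_neg (by omega), if_pos h0]
    | g + 1, g' + 1 =>
      rw [pvARec, pvARec]
      by_cases h1 : l.length = 1
      · simp [h1]
      · by_cases h0 : l.length = 0
        · simp [h0]
        · rw [if_neg h1, if_neg h0, if_neg h1, if_neg h0]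
          have h2 : 2 ≤ l.length := by omega
          have hL := ih (l.length / 2) (by omega) (l.take (l.length / 2)) g g'
            (by simp [List.length_take]; omega) (by omega) (by omega)
          have hR := ih (l.length - l.length / 2) (by omega) (l.drop (l.length / 2)) g g'
            (by simp [List.length_drop]) (by omega) (by omega)
          rw [hL, hR]

-- Any fuel drains an empty stack to the accumulator.
theorem pvBLoop_nil (f : Nat) (s out : List Char) : pvBLoop f s [] out = out := by
  match f with
  | 0 => rfl
  | g + 1 => rfl

-- Invariant: processing a valid nonempty range takes at most 3·(j-i)-2 steps and
-- appends exactly A's answer for that slice.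
theorem pvBLoop_range (s : List Char) :
    ∀ k i j, j - i = k → i < j → j ≤ s.length →
      ∃ t, t ≤ 3 * k - 2 ∧
        ∀ (rest : List (Option (Nat × Nat))) (out : List Char) (f : Nat),
          pvBLoop (t + f) s (some (i, j) :: rest) out
            = pvBLoop f s rest (out ++ pvARec k ((s.drop i).take k)) := by
  intro k
  induction k using Nat.strong_induction_on with
  | _ k ih =>
    intro i j hk hij hjs
    by_cases h1 : k = 1
    · refine ⟨1, by omega, ?_⟩
      intro rest out f
      rw [show (1 : Nat) + f = f + 1 from by omega, pvBLoop]
      have hlen : ((s.drop i).take 1).length = 1 := by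
        simp [List.length_take, List.length_drop]; omega
      have h1' : pvARec 1 ((s.drop i).take 1) = (s.drop i).take 1 := by
        rw [pvARec, if_pos hlen]
      simp only [hk, h1, h1', if_true]
    · -- k ≥ 2
      have h2 : 2 ≤ k := by omega
      set m := i + k / 2 with hm
      have him : i < m := by omega
      have hmj : m < j := by omega
      obtain ⟨t1, ht1, hL⟩ := ih (m - i) (by omega) i m rfl him (by omega)
      obtain ⟨t2, ht2, hR⟩ := ih (j - m) (by omega) m j rfl hmj hjs
      -- slice identities
      have hlen : ((s.drop i).take k).length = k := by
        simp [List.length_take, List.length_drop]; omega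
      have hLhalf : ((s.drop i).take k).take (k / 2) = (s.drop i).take (m - i) := by
        rw [List.take_take]; congr 1; omega
      have hRhalf : ((s.drop i).take k).drop (k / 2) = (s.drop m).take (j - m) := by
        rw [List.drop_take, List.drop_drop]
        congr 1 <;> omega
      have hsucc : k - 1 + 1 = k := by omega
      have hArec : pvARec k ((s.drop i).take k)
          = pvARec (m - i) ((s.drop i).take (m - i))
            ++ (if k % 2 = 0 then ['e'] else [])
            ++ pvARec (j - m) ((s.drop m).take (j - m)) := by
        rw [← hsucc, pvARec, hsucc, hlen, if_neg (by omega), if_neg (by omega),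
            hLhalf, hRhalf]
        rw [pvARec_congr (m - i) ((s.drop i).take (m - i)) (k - 1) (m - i)
              (by simp [List.length_take, List.length_drop]; omega) (by omega) le_rfl,
            pvARec_congr (j - m) ((s.drop m).take (j - m)) (k - 1) (j - m)
              (by simp [List.length_take, List.length_drop]; omega) (by omega) le_rfl]
      by_cases hev : k % 2 = 0
      · refine ⟨1 + t1 + 1 + t2, by omega, ?_⟩
        intro rest out f
        rw [show 1 + t1 + 1 + t2 + f = (t1 + (1 + t2 + f)) + 1 from by omega, pvBLoop]
        simp only [hk, if_neg h1, if_neg (show ¬ j ≤ i by omega), if_pos hev, ← hm]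
        rw [hL]
        rw [show 1 + t2 + f = (t2 + f) + 1 from by omega, pvBLoop]
        rw [hR, hArec, if_pos hev]
        simp [List.append_assoc]
      · refine ⟨1 + t1 + t2, by omega, ?_⟩
        intro rest out f
        rw [show 1 + t1 + t2 + f = (t1 + (t2 + f)) + 1 from by omega, pvBLoop]
        simp only [hk, if_neg h1, if_neg (show ¬ j ≤ i by omega), if_neg hev, ← hm]
        rw [hL, hR, hArec, if_neg hev]
        simp [List.append_assoc]

-- ===== VERDICT (by name: the statement is the Claim_ definition above) =====

theorem make_perf_tree_spec : Claim_equal_make_perf_tree := by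
  intro s _ hpre
  unfold Spec_make_perf_tree make_perf_tree make_perf_tree_alt
  have hne : s.toList ≠ [] := by
    intro h
    apply hpre
    have := congrArg String.ofList h
    simpa using this
  have hlen : 0 < s.toList.length := List.length_pos_of_ne_nil hne
  obtain ⟨t, ht, heq⟩ :=
    pvBLoop_range s.toList s.toList.length 0 s.toList.length rfl hlen le_rfl
  rw [show 3 * s.toList.length = t + (3 * s.toList.length - t) from by omega, heq,
      pvBLoop_nil]
  simp only [List.drop_zero, List.take_length, List.nil_append]
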